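-- pv_equiv track=rewrite | github.com/reach-the-sky/Image-viewer-python | images.py | filename_split_find
-- ===== SOURCE A (Python) =====
-- def filename_split_find(s):
--     c = s.count("/")
--     updated_s = []
--     temp = 0
--     for _ in s:
--         if (_ == "/"):
--             temp += 1
--             if (temp == c):
--                 break
--         updated_s.append(_)
--     updated_s = "".join(updated_s)
--     return updated_s
-- ===== SOURCE B (Python) =====
-- def filename_split_find(s):
--     for i in range(len(s) - 1, -1, -1):
--         if s[i] == "/":
--             return s[:i]
--     return s
-- ===== Notes on version B (the rewrite author's own statement) =====
-- stated objective: simpler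
-- what changed: Replaces A's two-pass count-all-slashes-then-forward-rescan with a single backward scan that stops at the first '/' from the end and slices there.
import Mathlib
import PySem

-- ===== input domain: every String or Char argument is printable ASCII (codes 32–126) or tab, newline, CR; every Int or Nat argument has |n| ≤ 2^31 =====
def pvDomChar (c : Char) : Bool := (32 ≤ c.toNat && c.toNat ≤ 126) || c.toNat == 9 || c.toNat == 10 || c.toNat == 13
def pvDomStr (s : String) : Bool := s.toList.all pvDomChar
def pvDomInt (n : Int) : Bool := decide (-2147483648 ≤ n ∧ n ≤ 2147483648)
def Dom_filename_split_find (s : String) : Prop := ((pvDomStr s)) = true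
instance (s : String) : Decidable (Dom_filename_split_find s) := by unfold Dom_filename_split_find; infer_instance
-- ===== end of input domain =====

-- B replaces A's two-pass count-all-slashes-then-forward-rescan with a single backward scan for the last '/'; objective: simpler.

-- ===== PORT A =====
-- A's for-loop over s: running slash counter `temp`, break (without appending) when temp reaches c
def pvALoop : List Char → Nat → Nat → List Char
  | [], _, _ => []
  | ch :: rest, c, temp =>
    if ch = '/' then
      if temp + 1 = c then []                        -- temp += 1; if temp == c: break
      else ch :: pvALoop rest c (temp + 1)
    else ch :: pvALoop rest c temp

def filename_split_find (s : String) : String :=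
  let c := PySem.Str.count s "/"                     -- c = s.count("/")
  String.ofList (pvALoop s.toList c 0)               -- updated_s = "".join(updated_s) of the appended chars

-- ===== PORT B =====
-- B's backward index loop `for i in range(len(s)-1, -1, -1)`: scan the reversed list, index i decreasing
def pvBScan : List Char → Nat → Option Nat
  | [], _ => none
  | ch :: rest, i => if ch = '/' then some i else pvBScan rest (i - 1)

def filename_split_find_alt (s : String) : String :=
  match pvBScan s.toList.reverse (s.toList.length - 1) with
  | some i => String.ofList (s.toList.take i)        -- s[:i]; here 0 ≤ i < len s, so the slice is take i
  | none => s

-- ===== PRECONDITION & SPEC =====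
def Spec_filename_split_find (s : String) (out : String) : Prop := out = filename_split_find_alt s
instance (s : String) (out : String) : Decidable (Spec_filename_split_find s out) := by unfold Spec_filename_split_find; infer_instance

-- ===== CLAIM (what is proved, stated in full; the proofs are below) =====
def Claim_equal_filename_split_find : Prop := ∀ (s : String), Dom_filename_split_find s → Spec_filename_split_find s (filename_split_find s)

-- ===== LEMMAS AND PROOFS =====

-- common characterisation: everything before the last '/', the whole list if there is none
def pvUntilLast : List Char → List Char
  | [] => []
  | ch :: rest =>
    if '/' ∈ rest then ch :: pvUntilLast rest
    else if ch = '/' then [] else ch :: rest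

theorem pvUntilLast_no_slash : ∀ (l : List Char), '/' ∉ l → pvUntilLast l = l := by
  intro l hm
  induction l with
  | nil => rfl
  | cons ch t ih =>
    simp only [List.mem_cons, not_or] at hm
    simp only [pvUntilLast, if_neg hm.2, if_neg (fun h : ch = '/' => hm.1 h.symm)]

theorem pvUntilLast_append_slash : ∀ (l : List Char), pvUntilLast (l ++ ['/']) = l := by
  intro l
  induction l with
  | nil => simp [pvUntilLast]
  | cons ch t ih =>
    have hmem : '/' ∈ t ++ ['/'] := by simp
    simp only [List.cons_append, pvUntilLast, if_pos hmem, ih]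

theorem pvUntilLast_append_of_mem : ∀ (l : List Char) (a : Char), '/' ∈ l → a ≠ '/' →
    pvUntilLast (l ++ [a]) = pvUntilLast l := by
  intro l a hm ha
  induction l with
  | nil => simp at hm
  | cons ch t ih =>
    by_cases hmt : '/' ∈ t
    · have : '/' ∈ t ++ [a] := List.mem_append_left _ hmt
      simp only [List.cons_append, pvUntilLast, if_pos this, if_pos hmt, ih hmt]
    · have hch : ch = '/' := by
        rcases List.mem_cons.mp hm with h | h
        · exact h.symm
        · exact absurd h hmt
      have : '/' ∉ t ++ [a] := by
        simp only [List.mem_append, List.mem_singleton, not_or]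
        exact ⟨hmt, fun h : '/' = a => ha h.symm⟩
      simp only [List.cons_append, pvUntilLast, if_neg this, if_neg hmt, if_pos hch]

theorem pv_count_go (fuel : Nat) : ∀ (l : List Char) (acc : Nat), l.length ≤ fuel →
    PySem.Chars.count.go ['/'] fuel l acc = acc + l.count '/' := by
  induction fuel with
  | zero =>
    intro l acc h
    have hl : l = [] := List.eq_nil_of_length_eq_zero (Nat.le_zero.mp h)
    subst hl
    simp [PySem.Chars.count.go]
  | succ n ih =>
    intro l acc h
    cases l with
    | nil => simp [PySem.Chars.count.go]
    | cons ch rest =>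
      simp only [PySem.Chars.count.go, List.isPrefixOf, Bool.and_true]
      by_cases hch : ch = '/'
      · subst hch
        simp only [beq_self_eq_true, if_true, List.length_cons, List.length_nil,
          List.drop_succ_cons, List.drop_zero]
        rw [ih rest (acc + 1) (by simpa using h)]
        simp
        omega
      · have hne : ('/' == ch) = false := by simp [Ne.symm hch]
        simp only [hne, Bool.false_eq_true, if_false]
        rw [ih rest acc (by simpa using h)]
        simp [hch]

theorem pv_count_slash (l : List Char) : PySem.Chars.count l ['/'] = l.count '/' := by
  simp [PySem.Chars.count, pv_count_go l.length l 0 le_rfl]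

theorem pv_aLoop_eq : ∀ (l : List Char) (temp c : Nat), c = temp + l.count '/' →
    pvALoop l c temp = pvUntilLast l := by
  intro l
  induction l with
  | nil => intro temp c _; rfl
  | cons ch rest ih =>
    intro temp c hcnt
    by_cases hch : ch = '/'
    · subst hch
      have hcc : List.count '/' ('/' :: rest) = List.count '/' rest + 1 := by simp
      have hA : pvALoop ('/' :: rest) c temp =
          (if temp + 1 = c then [] else '/' :: pvALoop rest c (temp + 1)) := by
        simp [pvALoop]
      rw [hA]
      by_cases hm : '/' ∈ rest
      · have hc0 : rest.count '/' ≠ 0 := by simpa [List.count_eq_zero] using hm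
        have hne : ¬ (temp + 1 = c) := by omega
        rw [if_neg hne]
        simp only [pvUntilLast, if_pos hm]
        exact congrArg _ (ih (temp + 1) c (by omega))
      · have hc0 : rest.count '/' = 0 := List.count_eq_zero.mpr hm
        have heq : temp + 1 = c := by omega
        rw [if_pos heq]
        simp [pvUntilLast, hm]
    · have hcc : List.count '/' (ch :: rest) = List.count '/' rest := by simp [hch]
      simp only [pvALoop, if_neg hch]
      by_cases hm : '/' ∈ rest
      · simp only [pvUntilLast, if_pos hm]
        exact congrArg _ (ih temp c (by omega))
      · simp only [pvUntilLast, if_neg hm, if_neg hch]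
        rw [ih temp c (by omega), pvUntilLast_no_slash rest hm]

theorem pv_bScan_le : ∀ (r : List Char) (i j : Nat), pvBScan r i = some j → j ≤ i := by
  intro r
  induction r with
  | nil => intro i j h; simp [pvBScan] at h
  | cons ch rest ih =>
    intro i j h
    simp only [pvBScan] at h
    split at h
    · cases h; exact le_rfl
    · exact le_trans (ih _ _ h) (Nat.sub_le i 1)

theorem pv_bScan_none : ∀ (r : List Char) (i : Nat), pvBScan r i = none ↔ '/' ∉ r := by
  intro r
  induction r with
  | nil => intro i; simp [pvBScan]
  | cons ch rest ih =>
    intro i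
    simp only [pvBScan, List.mem_cons, not_or]
    split
    · rename_i hch; subst hch; simp
    · rename_i hch
      rw [ih]
      exact ⟨fun h => ⟨fun he : '/' = ch => hch he.symm, h⟩, fun h => h.2⟩

theorem pv_B_eq (l : List Char) :
    (match pvBScan l.reverse (l.length - 1) with
     | some i => l.take i
     | none => l) = pvUntilLast l := by
  induction l using List.reverseRecOn with
  | nil => rfl
  | append_singleton l a ih =>
    simp only [List.reverse_append, List.reverse_singleton, List.singleton_append,
      List.length_append, List.length_singleton, Nat.add_sub_cancel]
    by_cases ha : a = '/'
    · subst ha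
      have hs : pvBScan ('/' :: l.reverse) l.length = some l.length := by simp [pvBScan]
      rw [hs]
      show List.take l.length (l ++ ['/']) = pvUntilLast (l ++ ['/'])
      rw [pvUntilLast_append_slash]
      exact List.take_left
    · have hs : pvBScan (a :: l.reverse) l.length = pvBScan l.reverse (l.length - 1) := by
        simp [pvBScan, ha]
      rw [hs]
      cases h : pvBScan l.reverse (l.length - 1) with
      | none =>
        have hm : '/' ∉ l := by
          have := (pv_bScan_none l.reverse _).mp h
          simpa using this
        have hma : '/' ∉ l ++ [a] := by
          simp only [List.mem_append, List.mem_singleton, not_or]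
          exact ⟨hm, fun he : '/' = a => ha he.symm⟩
        exact (pvUntilLast_no_slash _ hma).symm
      | some i =>
        have hmem : '/' ∈ l := by
          by_contra hm
          have hrev : '/' ∉ l.reverse := by simpa using hm
          rw [(pv_bScan_none l.reverse _).mpr hrev] at h
          cases h
        have hle : i ≤ l.length := le_trans (pv_bScan_le _ _ _ h) (Nat.sub_le _ _)
        rw [h] at ih
        show List.take i (l ++ [a]) = pvUntilLast (l ++ [a])
        rw [List.take_append_of_le_length hle, pvUntilLast_append_of_mem l a hmem ha]
        exact ih

-- ===== VERDICT (by name: the statement is the Claim_ definition above) =====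
theorem filename_split_find_spec : Claim_equal_filename_split_find := by
  intro s _
  unfold Spec_filename_split_find filename_split_find filename_split_find_alt
  have hc : PySem.Str.count s "/" = s.toList.count '/' := by
    rw [PySem.Str.count_eq]
    exact pv_count_slash s.toList
  have hA : pvALoop s.toList (PySem.Str.count s "/") 0 = pvUntilLast s.toList :=
    pv_aLoop_eq s.toList 0 _ (by omega)
  have hB := pv_B_eq s.toList
  show String.ofList (pvALoop s.toList (PySem.Str.count s "/") 0) = _
  rw [hA]
  cases h : pvBScan s.toList.reverse (s.toList.length - 1) with
  | none =>
    rw [h] at hB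
    show String.ofList (pvUntilLast s.toList) = s
    rw [← hB, String.ofList_toList]
  | some i =>
    rw [h] at hB
    exact congrArg String.ofList hB.symm
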